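-- pv_equiv track=rewrite | github.com/jwg4/exact_cover | exact_cover/wrapper.py | _solutions_array_to_set
-- ===== SOURCE A (Python) =====
-- def _solutions_array_to_set(a):
--     def truncate(row):
--         if all(x == 0 for x in row):
--             return [0]
--         else:
--             if row[-1] == 0:
--                 return truncate(row[:-1])
--             else:
--                 return row
--
--     return set([tuple(truncate(row)) for row in a])
-- ===== SOURCE B (Python) =====
-- def _solutions_array_to_set(a):
--     out = set()
--     for row in a:
--         i = len(row)
--         while i > 0 and row[i - 1] == 0:
--             i -= 1
--         out.add(tuple(row[:i]) if i > 0 else (0,))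
--     return out
-- ===== Notes on version B (the rewrite author's own statement) =====
-- stated objective: simpler
-- what changed: Replaced the recursive truncate helper (which rescans the whole row with all() at every recursion step and rebuilds a slice per trailing zero) by a single index-decrementing while loop per row that finds the trimmed length directly, appending (0,) when the trimmed length is 0.
import Mathlib
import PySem

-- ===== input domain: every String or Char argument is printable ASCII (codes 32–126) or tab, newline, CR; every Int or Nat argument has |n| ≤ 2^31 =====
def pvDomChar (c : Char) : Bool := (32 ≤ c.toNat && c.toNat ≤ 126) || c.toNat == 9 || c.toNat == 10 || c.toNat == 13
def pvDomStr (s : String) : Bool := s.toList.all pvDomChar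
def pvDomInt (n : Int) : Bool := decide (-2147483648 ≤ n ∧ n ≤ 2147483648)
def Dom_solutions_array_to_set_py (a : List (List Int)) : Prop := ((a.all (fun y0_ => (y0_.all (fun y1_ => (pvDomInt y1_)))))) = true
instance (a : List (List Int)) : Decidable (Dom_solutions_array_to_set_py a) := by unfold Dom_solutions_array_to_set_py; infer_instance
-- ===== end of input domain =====

-- B replaces A's recursive truncate (all() rescan + slice per trailing zero) by one index-decrementing loop per row: simpler, same results.


-- ===== PORT A =====
-- truncate(row): if all zero -> [0]; elif row[-1] == 0 -> truncate(row[:-1]); else row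
def pvTruncate (row : List Int) : List Int :=
  if row.all (fun x => x == 0) then [0]
  else if (PySem.List.pyGet? row (-1)).getD 0 == 0 then
    pvTruncate (PySem.List.slice row none (some (-1)))
  else row
termination_by row.length
decreasing_by
  simp only [PySem.List.slice_to_neg_one]
  have hne : row ≠ [] := by rintro rfl; simp at *
  have := List.length_pos_iff.mpr hne
  simp [List.length_dropLast]; omega

def solutions_array_to_set_py (a : List (List Int)) : List (List Int) :=
  PySem.Set.ofList (a.map pvTruncate)

-- ===== PORT B =====
-- while i > 0 and row[i-1] == 0: i -= 1   (recursion on i transcribes the loop)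
def pvTrimLen (row : List Int) : Nat → Nat
  | 0 => 0
  | i + 1 => if row.getD i 0 == 0 then pvTrimLen row i else i + 1

def solutions_array_to_set_py_alt (a : List (List Int)) : List (List Int) :=
  a.foldl (fun out row =>
    let i := pvTrimLen row row.length
    PySem.Set.add out (if i > 0 then row.take i else [0])) PySem.Set.empty

-- ===== PRECONDITION & SPEC =====
def Spec_solutions_array_to_set_py (a : List (List Int)) (out : List (List Int)) : Prop := out = solutions_array_to_set_py_alt a
instance (a : List (List Int)) (out : List (List Int)) : Decidable (Spec_solutions_array_to_set_py a out) := by unfold Spec_solutions_array_to_set_py; infer_instance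

-- ===== CLAIM (what is proved, stated in full; the proofs are below) =====
def Claim_equal_solutions_array_to_set_py : Prop := ∀ (a : List (List Int)), Dom_solutions_array_to_set_py a → Spec_solutions_array_to_set_py a (solutions_array_to_set_py a)

-- ===== LEMMAS AND PROOFS =====

theorem pvTrimLen_le (row : List Int) (i : Nat) : pvTrimLen row i ≤ i := by
  induction i with
  | zero => simp [pvTrimLen]
  | succ n ih => simp only [pvTrimLen]; split <;> omega

theorem pvTrimLen_of_all_zero (row : List Int) (h : ∀ x ∈ row, x = 0) (i : Nat) :
    pvTrimLen row i = 0 := by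
  induction i with
  | zero => rfl
  | succ n ih =>
    have hz : row.getD n 0 = 0 := by
      rcases lt_or_ge n row.length with hlt | hge
      · rw [List.getD_eq_getElem _ _ hlt]; exact h _ (List.getElem_mem hlt)
      · rw [List.getD_eq_getElem?_getD, List.getElem?_eq_none hge]; rfl
    simp only [pvTrimLen]
    rw [hz]
    simpa using ih

theorem pvTrimLen_dropLast (row : List Int) (i : Nat) (hi : i ≤ row.length - 1) :
    pvTrimLen row.dropLast i = pvTrimLen row i := by
  induction i with
  | zero => rfl
  | succ n ih =>
    have h1 : n < row.dropLast.length := by simp [List.length_dropLast]; omega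
    have h2 : n < row.length := by omega
    have hget : row.dropLast.getD n 0 = row.getD n 0 := by
      rw [List.getD_eq_getElem _ _ h1, List.getD_eq_getElem _ _ h2]
      exact List.getElem_dropLast ..
    simp only [pvTrimLen, hget]
    split
    · exact ih (by omega)
    · rfl

theorem pvTruncate_eq_trim (row : List Int) :
    pvTruncate row =
      (if pvTrimLen row row.length > 0 then row.take (pvTrimLen row row.length) else [0]) := by
  induction hn : row.length using Nat.strong_induction_on generalizing row with
  | _ n ih =>
  subst hn
  rw [pvTruncate]
  by_cases hall : row.all (fun x => x == 0)
  · have h0 : pvTrimLen row row.length = 0 :=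
      pvTrimLen_of_all_zero row (by intro x hx; simpa using (List.all_eq_true.mp hall) x hx) _
    simp [hall, h0]
  · have hne : row ≠ [] := by rintro rfl; simp at hall
    have hlenpos : 0 < row.length := List.length_pos_iff.mpr hne
    obtain ⟨m, hm⟩ : ∃ m, row.length = m + 1 := ⟨row.length - 1, by omega⟩
    have hlast : (PySem.List.pyGet? row (-1)).getD 0 = row.getD m 0 := by
      rw [PySem.List.pyGet?_neg_one, List.getLast?_eq_getElem?, List.getD_eq_getElem?_getD, hm]
      simp
    rw [if_neg hall]
    by_cases hz : row.getD m 0 = 0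
    · -- last element is 0: A recurses on dropLast
      rw [hlast, hz]
      simp only [beq_self_eq_true, if_true, PySem.List.slice_to_neg_one]
      have hdl : row.dropLast.length = m := by simp [List.length_dropLast, hm]
      rw [ih row.dropLast.length (by omega) row.dropLast rfl]
      have htl : pvTrimLen row row.length = pvTrimLen row.dropLast row.dropLast.length := by
        rw [hm, hdl]
        simp only [pvTrimLen]
        rw [hz]
        simpa using (pvTrimLen_dropLast row m (by omega)).symm
      rw [htl]
      by_cases hpos : pvTrimLen row.dropLast row.dropLast.length > 0
      · have hle : pvTrimLen row.dropLast row.dropLast.length ≤ m := hdl ▸ pvTrimLen_le _ _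
        set k := pvTrimLen row.dropLast row.dropLast.length with hk
        rw [if_pos hpos, if_pos hpos,
          show List.take k row.dropLast = List.take k row by
            rw [List.dropLast_eq_take, List.take_take]
            congr 1
            omega]
      · rw [if_neg hpos, if_neg hpos]
    · -- last element nonzero: A returns row, trim length is full length
      have hzne : (row.getD m 0 == 0) = false := by
        rw [beq_eq_false_iff_ne]
        exact hz
      rw [hlast, hzne]
      have htf : pvTrimLen row row.length = row.length := by
        rw [hm]
        simp only [pvTrimLen]
        rw [hzne]
        simp
      rw [if_neg (by simp), htf, if_pos hlenpos, List.take_length]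

-- ===== VERDICT (by name: the statement is the Claim_ definition above) =====
theorem solutions_array_to_set_py_spec : Claim_equal_solutions_array_to_set_py := by
  intro a _
  unfold Spec_solutions_array_to_set_py solutions_array_to_set_py solutions_array_to_set_py_alt
  simp only [PySem.Set.ofList_eq_foldl, List.foldl_map, pvTruncate_eq_trim]
  rfl
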